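-- pv_equiv track=rewrite | github.com/David-Antolick/Rosalind | grph.py | adjacency_detector
-- ===== SOURCE A (Python) =====
-- def _dict_organizer(fasta_dict):
--     new_dict = {}
--
--     k = 3
--     for key in fasta_dict:
--         prefx = fasta_dict[key][:k]
--         suffx = fasta_dict[key][-k:]
--         new_dict[key] = [fasta_dict[key], prefx, suffx]
--
--     return new_dict
--
-- def adjacency_detector(fasta_dict):
--
--     dict_plus = _dict_organizer(fasta_dict)
--     adj_list = []
--
--     for key1 in dict_plus:
--         for key2 in dict_plus:
--             if key2 != key1:
--                 if dict_plus[key1][1] == dict_plus[key2][2]: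
--                     adj_list.append([key1, key2])
--
--     return adj_list
-- ===== SOURCE B (Python) =====
-- def adjacency_detector(fasta_dict):
--     k = 3
--     suffix_index = {}
--     for key, seq in fasta_dict.items():
--         suffix_index.setdefault(seq[-k:], []).append(key)
--     adj_list = []
--     for key1, seq1 in fasta_dict.items():
--         for key2 in suffix_index.get(seq1[:k], []):
--             if key2 != key1:
--                 adj_list.append([key1, key2])
--     return adj_list
-- ===== Notes on version B (the rewrite author's own statement) =====
-- stated objective: faster
-- what changed: Replaces the all-pairs double loop with a one-pass dict indexing keys by their 3-character suffix, so each prefix is matched by a single bucket lookup.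
import Mathlib
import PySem

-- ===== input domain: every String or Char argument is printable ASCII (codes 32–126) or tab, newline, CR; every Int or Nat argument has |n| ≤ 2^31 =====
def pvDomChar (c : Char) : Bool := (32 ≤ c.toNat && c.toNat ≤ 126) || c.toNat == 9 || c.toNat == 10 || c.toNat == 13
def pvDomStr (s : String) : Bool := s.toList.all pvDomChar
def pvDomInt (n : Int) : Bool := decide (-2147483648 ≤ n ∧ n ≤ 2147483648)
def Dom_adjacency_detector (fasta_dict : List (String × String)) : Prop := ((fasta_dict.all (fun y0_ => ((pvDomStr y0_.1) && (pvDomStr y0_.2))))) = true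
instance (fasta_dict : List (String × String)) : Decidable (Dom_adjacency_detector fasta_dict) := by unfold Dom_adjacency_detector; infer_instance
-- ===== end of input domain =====

-- B replaces A's all-pairs double loop with a dict indexing keys by 3-suffix, looked up per prefix (asymptotically faster).


-- ===== PORT A =====
-- _dict_organizer: new_dict[key] = [seq, seq[:3], seq[-3:]] (keys unique under Pre_, so the dict is the list in insertion order)
def pvDictOrganizer (fasta_dict : List (String × String)) : List (String × List Char × List Char × List Char) :=
  fasta_dict.foldl (fun nd kv =>
    nd ++ [(kv.1, kv.2.toList,
            PySem.List.slice kv.2.toList none (some 3),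
            PySem.List.slice kv.2.toList (some (-3)) none)]) []

def adjacency_detector (fasta_dict : List (String × String)) : List (List String) :=
  let dict_plus := pvDictOrganizer fasta_dict
  dict_plus.foldl (fun adj k1 =>
    dict_plus.foldl (fun adj k2 =>
      if k2.1 ≠ k1.1 then
        (if k1.2.2.1 = k2.2.2.2 then adj ++ [[k1.1, k2.1]] else adj)
      else adj) adj) []

-- ===== PORT B =====
def pvPre3 (s : String) : List Char := PySem.List.slice s.toList none (some 3)
def pvSuf3 (s : String) : List Char := PySem.List.slice s.toList (some (-3)) none

def adjacency_detector_alt (fasta_dict : List (String × String)) : List (List String) :=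
  let idx : PySem.Dict (List Char) (List String) :=
    fasta_dict.foldl (fun d kv => d.modify (pvSuf3 kv.2) [] (· ++ [kv.1])) PySem.Dict.empty
  fasta_dict.foldl (fun adj kv =>
    (idx.getD (pvPre3 kv.2) []).foldl (fun adj k2 =>
      if k2 ≠ kv.1 then adj ++ [[kv.1, k2]] else adj) adj) []

-- ===== PRECONDITION & SPEC =====
-- Pre_ excludes association lists with duplicate keys: a Python dict cannot contain them, so such lists
-- encode no Python input of A at all.
def Pre_adjacency_detector (fasta_dict : List (String × String)) : Prop :=
  (fasta_dict.map Prod.fst).Nodup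
instance (fasta_dict : List (String × String)) : Decidable (Pre_adjacency_detector fasta_dict) := by
  unfold Pre_adjacency_detector; infer_instance

def pvWitness_adjacency_detector : (List (String × String)) :=
  [("Rosalind_1", "AATCG"), ("Rosalind_2", "TCGAA"), ("Rosalind_3", "GG")]

def Spec_adjacency_detector (fasta_dict : List (String × String)) (out : List (List String)) : Prop := out = adjacency_detector_alt fasta_dict
instance (fasta_dict : List (String × String)) (out : List (List String)) : Decidable (Spec_adjacency_detector fasta_dict out) := by unfold Spec_adjacency_detector; infer_instance

-- ===== CLAIM (what is proved, stated in full; the proofs are below) =====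
def Claim_equal_adjacency_detector : Prop := ∀ (fasta_dict : List (String × String)), Dom_adjacency_detector fasta_dict → Pre_adjacency_detector fasta_dict → Spec_adjacency_detector fasta_dict (adjacency_detector fasta_dict)

-- ===== LEMMAS AND PROOFS =====

-- _dict_organizer's append loop is a map over the input pairs
lemma pvDictOrganizer_eq_map (l : List (String × String)) :
    pvDictOrganizer l = l.map (fun kv =>
      (kv.1, kv.2.toList, pvPre3 kv.2, pvSuf3 kv.2)) := by
  unfold pvDictOrganizer pvPre3 pvSuf3
  simpa using PySem.List.foldl_append_singleton_eq_map
    (fun kv : String × String => (kv.1, kv.2.toList,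
      PySem.List.slice kv.2.toList none (some 3),
      PySem.List.slice kv.2.toList (some (-3)) none)) l []

-- the suffix index's bucket for p lists, in order, the keys whose sequence has 3-suffix p
lemma pvIdx_getD (l : List (String × String)) (p : List Char) :
    ((l.foldl (fun d kv => d.modify (pvSuf3 kv.2) [] (· ++ [kv.1]))
        (PySem.Dict.empty : PySem.Dict (List Char) (List String))).getD p [])
      = (l.filter (fun kv => pvSuf3 kv.2 == p)).map Prod.fst := by
  have h : l.foldl (fun d kv => d.modify (pvSuf3 kv.2) [] (· ++ [kv.1]))
        (PySem.Dict.empty : PySem.Dict (List Char) (List String))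
      = (l.map (fun kv => (pvSuf3 kv.2, kv.1))).foldl
          (fun d q => d.modify q.1 [] (· ++ [q.2])) PySem.Dict.empty := by
    rw [List.foldl_map]
  rw [h, PySem.Dict.getD_foldl_modify_append, PySem.Dict.getD_empty]
  simp [List.filter_map, Function.comp_def]

-- A's inner scan over all entries equals B's scan over the matching bucket
lemma pvInner (l : List (String × String)) (k1 : String) (p : List Char)
    (adj : List (List String)) :
    l.foldl (fun adj kv =>
        if kv.1 ≠ k1 then (if p = pvSuf3 kv.2 then adj ++ [[k1, kv.1]] else adj) else adj) adj
      = ((l.filter (fun kv => pvSuf3 kv.2 == p)).map Prod.fst).foldl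
          (fun adj k2 => if k2 ≠ k1 then adj ++ [[k1, k2]] else adj) adj := by
  induction l generalizing adj with
  | nil => rfl
  | cons kv t ih =>
    simp only [List.foldl_cons, List.filter_cons]
    by_cases hk : kv.1 = k1 <;> by_cases hs : pvSuf3 kv.2 = p
    · rw [if_neg (not_not_intro hk), if_pos (by simp [hs]), List.map_cons,
        List.foldl_cons, if_neg (not_not_intro hk)]
      exact ih adj
    · rw [if_neg (not_not_intro hk), if_neg (by simp [hs])]
      exact ih adj
    · rw [if_pos hk, if_pos hs.symm, if_pos (by simp [hs]), List.map_cons,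
        List.foldl_cons, if_pos hk]
      exact ih _
    · rw [if_pos hk, if_neg (fun h => hs h.symm), if_neg (by simp [hs])]
      exact ih adj

-- ===== VERDICT (by name: the statement is the Claim_ definition above) =====
theorem adjacency_detector_spec : Claim_equal_adjacency_detector := by
  intro fasta_dict _ _
  unfold Spec_adjacency_detector adjacency_detector adjacency_detector_alt
  simp only [pvDictOrganizer_eq_map, List.foldl_map]
  congr 1
  funext adj kv
  rw [pvInner, pvIdx_getD]
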